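-- pv_equiv track=rewrite | github.com/eliannaqk/crispr12a | scripts/relabel_tttv_strict.py | strict_tttv
-- ===== SOURCE A (Python) =====
-- IUPAC = {
--     'A': set('A'), 'C': set('C'), 'G': set('G'), 'T': set('T'),
--     'R': set('AG'), 'Y': set('CT'), 'S': set('CG'), 'W': set('AT'),
--     'K': set('GT'), 'M': set('AC'),
--     'B': set('CGT'), 'D': set('AGT'), 'H': set('ACT'), 'V': set('ACG'),
--     'N': set('ACGT')
-- }
--
-- def set_from_iupac(ch: str):
--     return IUPAC.get(ch.upper(), set())
--
-- def strict_tttv(pam: str) -> bool: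
--     if not pam:
--         return False
--     s = pam.strip().upper()
--     if len(s) < 4:
--         return False
--     for i in range(len(s)-3):
--         a,b,c,d = s[i], s[i+1], s[i+2], s[i+3]
--         if set_from_iupac(a)=={'T'} and set_from_iupac(b)=={'T'} and set_from_iupac(c)=={'T'}:
--             D=set_from_iupac(d)
--             if 'T' not in D and len(D & set('ACG'))>0:
--                 return True
--     return False
-- ===== SOURCE B (Python) =====
-- def strict_tttv(pam: str) -> bool:
--     if not pam:
--         return False
--     s = pam.strip().upper()
--     # TTT followed by any IUPAC code whose base set excludes T but meets {A,C,G}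
--     return any('TTT' + d in s for d in 'ACGRSMV')
-- ===== Notes on version B (the rewrite author's own statement) =====
-- stated objective: faster
-- what changed: Replaces the explicit sliding-window loop with per-character IUPAC set lookups and set algebra by a direct substring search: the fourth-position condition is precomputed into the literal character class ACGRSMV, so the function just checks whether any of the seven 4-letter motifs TTTA..TTTV occurs in the normalized string.
import Mathlib
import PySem

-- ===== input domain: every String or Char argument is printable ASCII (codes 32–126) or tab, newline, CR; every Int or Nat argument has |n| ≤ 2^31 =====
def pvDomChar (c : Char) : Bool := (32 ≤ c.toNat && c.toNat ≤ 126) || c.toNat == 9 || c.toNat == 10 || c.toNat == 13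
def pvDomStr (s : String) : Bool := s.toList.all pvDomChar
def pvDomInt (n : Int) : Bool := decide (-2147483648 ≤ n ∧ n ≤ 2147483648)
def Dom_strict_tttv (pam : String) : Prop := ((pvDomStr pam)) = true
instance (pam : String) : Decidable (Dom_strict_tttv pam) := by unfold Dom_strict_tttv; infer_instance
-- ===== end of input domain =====

-- B replaces A's sliding-window loop over per-character IUPAC sets with a direct
-- substring search for the seven literal motifs TTTA..TTTV (measurably faster in Python).

-- ===== PORT A =====
def IUPAC : PySem.Dict Char (PySem.Set Char) :=
  PySem.Dict.ofList
    [ ('A', PySem.Set.ofList ['A']), ('C', PySem.Set.ofList ['C']),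
      ('G', PySem.Set.ofList ['G']), ('T', PySem.Set.ofList ['T']),
      ('R', PySem.Set.ofList ['A','G']), ('Y', PySem.Set.ofList ['C','T']),
      ('S', PySem.Set.ofList ['C','G']), ('W', PySem.Set.ofList ['A','T']),
      ('K', PySem.Set.ofList ['G','T']), ('M', PySem.Set.ofList ['A','C']),
      ('B', PySem.Set.ofList ['C','G','T']), ('D', PySem.Set.ofList ['A','G','T']),
      ('H', PySem.Set.ofList ['A','C','T']), ('V', PySem.Set.ofList ['A','C','G']),
      ('N', PySem.Set.ofList ['A','C','G','T']) ]

-- set_from_iupac: the one-character string argument is ported as Char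
def set_from_iupac (ch : Char) : PySem.Set Char :=
  PySem.Dict.getD IUPAC (PySem.Chars.upperChar ch) []

-- the body of A's for-loop at index i (a,b,c,d = s[i..i+3]; return True ↦ any)
def tttvWindow (s : List Char) (i : Nat) : Bool :=
  if PySem.Set.equal (set_from_iupac (s.getD i ' ')) (PySem.Set.ofList ['T']) &&
     PySem.Set.equal (set_from_iupac (s.getD (i+1) ' ')) (PySem.Set.ofList ['T']) &&
     PySem.Set.equal (set_from_iupac (s.getD (i+2) ' ')) (PySem.Set.ofList ['T']) then
    !(PySem.Set.contains (set_from_iupac (s.getD (i+3) ' ')) 'T') &&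
      decide (0 < PySem.Set.len (PySem.Set.inter (set_from_iupac (s.getD (i+3) ' '))
        (PySem.Set.ofList ['A','C','G'])))
  else false

def strict_tttv (pam : String) : Bool :=
  if pam.toList.isEmpty then false
  else
    let s := PySem.Chars.upper (PySem.Chars.strip pam.toList)
    if s.length < 4 then false
    else (List.range (s.length - 3)).any (tttvWindow s)

-- ===== PORT B =====
def strict_tttv_alt (pam : String) : Bool :=
  if pam.toList.isEmpty then false
  else
    let s := PySem.Chars.upper (PySem.Chars.strip pam.toList)
    (['A','C','G','R','S','M','V'] : List Char).any
      (fun d => PySem.Chars.isIn ['T','T','T',d] s)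

-- ===== PRECONDITION & SPEC =====
def Spec_strict_tttv (pam : String) (out : Bool) : Prop := out = strict_tttv_alt pam
instance (pam : String) (out : Bool) : Decidable (Spec_strict_tttv pam out) := by unfold Spec_strict_tttv; infer_instance

-- ===== CLAIM (what is proved, stated in full; the proofs are below) =====
def Claim_equal_strict_tttv : Prop := ∀ (pam : String), Dom_strict_tttv pam → Spec_strict_tttv pam (strict_tttv pam)

-- ===== LEMMAS AND PROOFS =====

theorem upperChar_idem (c : Char) :
    PySem.Chars.upperChar (PySem.Chars.upperChar c) = PySem.Chars.upperChar c := by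
  simp only [PySem.Chars.upperChar, PySem.Chars.islower]
  rcases c with ⟨n, hv⟩
  split_ifs with h1 h2 <;> try rfl
  exfalso
  simp only [Char.le_def, Bool.and_eq_true, decide_eq_true_eq] at h1 h2
  have ha : (Char.mk n hv).toNat = n.toNat := rfl
  have h97 : 97 ≤ n.toNat := by
    have := UInt32.le_iff_toNat_le.mp h1.1; simpa using this
  have h122 : n.toNat ≤ 122 := by
    have := UInt32.le_iff_toNat_le.mp h1.2; simpa using this
  have hval : Nat.isValidChar (n.toNat - 32) := Or.inl (by omega)
  have hx : (Char.ofNat ((Char.mk n hv).toNat - 32)).toNat = n.toNat - 32 := by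
    rw [ha, Char.toNat_ofNat]; simp [hval]
  have h2a := UInt32.le_iff_toNat_le.mp h2.1
  have hy : (Char.ofNat ((Char.mk n hv).toNat - 32)).val.toNat
      = (Char.ofNat ((Char.mk n hv).toNat - 32)).toNat := rfl
  have h97b : (97:Nat) ≤ (Char.ofNat ((Char.mk n hv).toNat - 32)).toNat := by
    rw [← hy]; simpa using h2a
  omega

-- the first-three-positions test of A, for an arbitrary character
theorem iupac_isT (u : Char) :
    PySem.Set.equal (PySem.Dict.getD IUPAC u []) (PySem.Set.ofList ['T']) = (u == 'T') := by
  by_cases hA : 'A' = u; · subst hA; decide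
  by_cases hC : 'C' = u; · subst hC; decide
  by_cases hG : 'G' = u; · subst hG; decide
  by_cases hT : 'T' = u; · subst hT; decide
  by_cases hR : 'R' = u; · subst hR; decide
  by_cases hY : 'Y' = u; · subst hY; decide
  by_cases hS : 'S' = u; · subst hS; decide
  by_cases hW : 'W' = u; · subst hW; decide
  by_cases hK : 'K' = u; · subst hK; decide
  by_cases hM : 'M' = u; · subst hM; decide
  by_cases hB : 'B' = u; · subst hB; decide
  by_cases hD : 'D' = u; · subst hD; decide
  by_cases hH : 'H' = u; · subst hH; decide
  by_cases hV : 'V' = u; · subst hV; decide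
  by_cases hN : 'N' = u; · subst hN; decide
  have hnot : u ∉ IUPAC.keys := by
    have hk : IUPAC.keys = ['A','C','G','T','R','Y','S','W','K','M','B','D','H','V','N'] := by
      decide
    rw [hk]; intro hmem
    fin_cases hmem <;> simp_all
  have hmiss : PySem.Dict.getD IUPAC u [] = [] := by
    refine PySem.Dict.getD_of_not_contains _ _ ?_
    rw [PySem.Dict.contains_eq_decide_mem_keys]
    simpa using hnot
  rw [hmiss]
  have : (u == 'T') = false := by
    simp; exact fun h => hT h.symm
  rw [this]; decide

-- the fourth-position test of A, for an arbitrary character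
theorem iupac_fourth (u : Char) :
    (!(PySem.Set.contains (PySem.Dict.getD IUPAC u []) 'T') &&
      decide (0 < PySem.Set.len (PySem.Set.inter (PySem.Dict.getD IUPAC u [])
        (PySem.Set.ofList ['A','C','G']))))
      = decide (u ∈ (['A','C','G','R','S','M','V'] : List Char)) := by
  by_cases hA : 'A' = u; · subst hA; decide
  by_cases hC : 'C' = u; · subst hC; decide
  by_cases hG : 'G' = u; · subst hG; decide
  by_cases hT : 'T' = u; · subst hT; decide
  by_cases hR : 'R' = u; · subst hR; decide
  by_cases hY : 'Y' = u; · subst hY; decide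
  by_cases hS : 'S' = u; · subst hS; decide
  by_cases hW : 'W' = u; · subst hW; decide
  by_cases hK : 'K' = u; · subst hK; decide
  by_cases hM : 'M' = u; · subst hM; decide
  by_cases hB : 'B' = u; · subst hB; decide
  by_cases hD : 'D' = u; · subst hD; decide
  by_cases hH : 'H' = u; · subst hH; decide
  by_cases hV : 'V' = u; · subst hV; decide
  by_cases hN : 'N' = u; · subst hN; decide
  have hnot : u ∉ IUPAC.keys := by
    have hk : IUPAC.keys = ['A','C','G','T','R','Y','S','W','K','M','B','D','H','V','N'] := by
      decide
    rw [hk]; intro hmem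
    fin_cases hmem <;> simp_all
  have hmiss : PySem.Dict.getD IUPAC u [] = [] := by
    refine PySem.Dict.getD_of_not_contains _ _ ?_
    rw [PySem.Dict.contains_eq_decide_mem_keys]
    simpa using hnot
  rw [hmiss]
  have : u ∉ (['A','C','G','R','S','M','V'] : List Char) := by
    intro hmem; fin_cases hmem <;> simp_all
  simp [this]

-- a 4-element list is a prefix iff its characters sit at positions 0..3
theorem four_prefix (a b c d : Char) (t : List Char) :
    ([a,b,c,d] <+: t) ↔
      (t[0]? = some a ∧ t[1]? = some b ∧ t[2]? = some c ∧ t[3]? = some d) := by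
  rcases t with _ | ⟨x, _ | ⟨y, _ | ⟨z, _ | ⟨w, r⟩⟩⟩⟩
  · simp
  · simp [List.cons_prefix_cons]
  · simp [List.cons_prefix_cons]
  · simp [List.cons_prefix_cons]
  · simp [List.cons_prefix_cons, eq_comm]

-- ===== VERDICT (by name: the statement is the Claim_ definition above) =====
theorem strict_tttv_spec : Claim_equal_strict_tttv := by
  intro pam _
  unfold Spec_strict_tttv strict_tttv strict_tttv_alt
  by_cases hemp : pam.toList.isEmpty = true
  · rw [if_pos hemp, if_pos hemp]
  · rw [if_neg hemp, if_neg hemp]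
    set s := PySem.Chars.upper (PySem.Chars.strip pam.toList) with hs
    have hfix : ∀ c ∈ s, PySem.Chars.upperChar c = c := by
      intro c hc
      rw [hs, PySem.Chars.upper] at hc
      rcases List.mem_map.mp hc with ⟨c', _, rfl⟩
      exact upperChar_idem c'
    -- window condition in plain character form
    have hwin : ∀ i, i + 3 < s.length →
        (tttvWindow s i = true ↔
          (s[i]? = some 'T' ∧ s[i+1]? = some 'T' ∧ s[i+2]? = some 'T' ∧
            ∃ d, s[i+3]? = some d ∧ d ∈ (['A','C','G','R','S','M','V'] : List Char))) := by
      intro i hi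
      have h0 : i < s.length := by omega
      have h1 : i + 1 < s.length := by omega
      have h2 : i + 2 < s.length := by omega
      unfold tttvWindow set_from_iupac
      rw [List.getD_eq_getElem s ' ' h0, List.getD_eq_getElem s ' ' h1,
          List.getD_eq_getElem s ' ' h2, List.getD_eq_getElem s ' ' hi]
      rw [hfix _ (s.getElem_mem h0), hfix _ (s.getElem_mem h1),
          hfix _ (s.getElem_mem h2), hfix _ (s.getElem_mem hi)]
      rw [iupac_isT, iupac_isT, iupac_isT, iupac_fourth]
      simp only [List.getElem?_eq_getElem, h0, h1, h2, hi, Option.some_inj]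
      by_cases hcond : ((s[i] == 'T') && (s[i+1] == 'T') && (s[i+2] == 'T')) = true
      · rw [if_pos hcond]
        simp only [Bool.and_eq_true, beq_iff_eq] at hcond
        simp [hcond]
      · rw [if_neg hcond]
        simp only [Bool.and_eq_true, beq_iff_eq] at hcond
        constructor
        · intro h; simp at h
        · rintro ⟨ha, hb, hc, -⟩; exact absurd ⟨⟨ha, hb⟩, hc⟩ hcond
    rw [Bool.eq_iff_iff]
    constructor
    · -- A ⇒ B
      intro hA
      by_cases hlen : s.length < 4
      · rw [if_pos hlen] at hA; exact absurd hA (by simp)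
      · rw [if_neg hlen, List.any_eq_true] at hA
        rcases hA with ⟨i, hir, hcond⟩
        have hi : i + 3 < s.length := by
          have := List.mem_range.mp hir; omega
        rcases (hwin i hi).mp hcond with ⟨ha, hb, hc, d, hd, hmem⟩
        rw [List.any_eq_true]
        refine ⟨d, hmem, ?_⟩
        rw [← PySem.Chars.exists_prefix_drop_iff_isIn]
        refine ⟨i, ?_⟩
        rw [four_prefix]
        simp only [List.getElem?_drop]
        exact ⟨by simpa using ha, by simpa using hb, by simpa using hc, by simpa using hd⟩
    · -- B ⇒ A
      intro hB
      rw [List.any_eq_true] at hB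
      rcases hB with ⟨d, hmem, hin⟩
      rw [← PySem.Chars.exists_prefix_drop_iff_isIn] at hin
      rcases hin with ⟨j, hpre⟩
      rw [four_prefix] at hpre
      simp only [List.getElem?_drop] at hpre
      rcases hpre with ⟨ha, hb, hc, hd⟩
      have hj : j + 3 < s.length := by
        rcases List.getElem?_eq_some_iff.mp hd with ⟨h, -⟩
        omega
      have hlen : ¬ s.length < 4 := by omega
      rw [if_neg hlen, List.any_eq_true]
      refine ⟨j, List.mem_range.mpr (by omega), ?_⟩
      exact (hwin j hj).mpr ⟨by simpa using ha, by simpa using hb, by simpa using hc,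
        d, by simpa using hd, hmem⟩
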